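-- pv_equiv track=rewrite | github.com/justirbs/L-system-python | L-System.py | partition_axiom
-- ===== SOURCE A (Python) =====
-- def partition_axiom(string, patterns):
--     res = []                                                                                        #
--     for p, i in patterns:                                                                           # ermm.. ill come back to this
--         if p in string:
--             b,f,a = string.partition(p)
--             if b:
--                 res += partition_axiom(b, patterns)
--             res += [f]
--             if a:
--                 res += partition_axiom(a, patterns)
--             break
--     else:
--         res = [string]
--     return res
-- ===== SOURCE B (Python) =====
-- def partition_axiom(string, patterns):
--     # Iterative version: explicit work stack of tagged items instead of recursion.
--     # (False, s) = raw text still to be split; (True, t) = finished token to emit.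
--     res = []
--     stack = [(False, string)]
--     while stack:
--         resolved, s = stack.pop()
--         if resolved:
--             res.append(s)
--             continue
--         for p, _ in patterns:
--             if p in s:
--                 b, f, a = s.partition(p)
--                 if a:
--                     stack.append((False, a))
--                 stack.append((True, f))
--                 if b:
--                     stack.append((False, b))
--                 break
--         else:
--             res.append(s)
--     return res
-- ===== Notes on version B (the rewrite author's own statement) =====
-- stated objective: alternative
-- what changed: Replaces A's recursion (two recursive calls per match, concatenating sublists) with a single iterative loop over an explicit stack of tagged items (raw text vs resolved tokens), emitting tokens left-to-right into one result list.
-- outside the precondition, e.g. on partition_axiom('a', [('a', 1), ('', 2)]): A returns ['a'], B returns ['a']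
import Mathlib
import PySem

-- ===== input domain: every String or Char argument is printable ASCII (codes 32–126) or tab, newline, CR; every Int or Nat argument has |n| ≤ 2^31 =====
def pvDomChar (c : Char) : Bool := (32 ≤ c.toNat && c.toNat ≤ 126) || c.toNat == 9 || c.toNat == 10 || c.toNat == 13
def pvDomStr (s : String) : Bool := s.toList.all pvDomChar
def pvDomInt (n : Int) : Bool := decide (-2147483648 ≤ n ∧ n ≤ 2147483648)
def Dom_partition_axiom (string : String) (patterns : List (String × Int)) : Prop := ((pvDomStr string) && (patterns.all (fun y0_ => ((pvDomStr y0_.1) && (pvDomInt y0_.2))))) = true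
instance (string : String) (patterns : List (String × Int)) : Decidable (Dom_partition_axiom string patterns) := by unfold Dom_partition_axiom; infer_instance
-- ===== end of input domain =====

-- B replaces A's recursion with an iterative loop over an explicit stack of tagged
-- (raw / resolved) items; same token list, similar cost (objective: alternative).


-- shared with both ports: facts about a successful `p in s` match, needed for termination
theorem pvMatch_split (s p : List Char) (hin : PySem.Chars.isIn p s = true) :
    s = s.take (PySem.Chars.find s p).toNat ++ p ++ s.drop ((PySem.Chars.find s p).toNat + p.length) := by
  have h0 : (0:Int) ≤ PySem.Chars.find s p := (PySem.Chars.find_nonneg_iff s p).mpr ((PySem.Chars.isIn_iff_infix p s).mp hin)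
  obtain ⟨hpre, -⟩ := PySem.Chars.find_spec h0
  obtain ⟨t, ht⟩ := hpre
  have hd : s.drop ((PySem.Chars.find s p).toNat + p.length) = t := by
    rw [← List.drop_drop (i := p.length) (j := (PySem.Chars.find s p).toNat), ← ht]
    simp
  rw [hd, List.append_assoc, ht, List.take_append_drop]

theorem pvMatch_take_lt (s p : List Char) (hin : PySem.Chars.isIn p s = true) (hp : p ≠ []) :
    (s.take (PySem.Chars.find s p).toNat).length < s.length := by
  have := pvMatch_split s p hin
  have hlen : s.length = (s.take (PySem.Chars.find s p).toNat).length + p.length + (s.drop ((PySem.Chars.find s p).toNat + p.length)).length := by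
    conv_lhs => rw [this]
    simp
    omega
  have : 0 < p.length := List.length_pos_iff.mpr hp
  omega

theorem pvMatch_drop_lt (s p : List Char) (hin : PySem.Chars.isIn p s = true) (hp : p ≠ []) :
    (s.drop ((PySem.Chars.find s p).toNat + p.length)).length < s.length := by
  have := pvMatch_split s p hin
  have hlen : s.length = (s.take (PySem.Chars.find s p).toNat).length + p.length + (s.drop ((PySem.Chars.find s p).toNat + p.length)).length := by
    conv_lhs => rw [this]
    simp
    omega
  have : 0 < p.length := List.length_pos_iff.mpr hp
  omega

-- ===== PORT A =====
-- A's recursion, on List Char; `all` is the full pattern list (A's recursive calls restart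
-- the `for` loop from the beginning), `pats` the remaining loop suffix.
-- `p in string` is PySem.Chars.isIn; `string.partition(p)` at a match is
-- (take i, p, drop (i + len p)) at the FIRST occurrence i = find s p — exact for p ≠ [];
-- for p = [] Python's partition raises ValueError (excluded by Pre_), the port returns [].
def paGo (all : List (List Char × Int)) (pats : List (List Char × Int)) (s : List Char) : List (List Char) :=
  match pats with
  | [] => [s]
  | (p, _) :: rest =>
    if hin : PySem.Chars.isIn p s = true then
      if hp : p = [] then []   -- Python raises ValueError here; outside Pre_
      else
        let b := s.take (PySem.Chars.find s p).toNat
        let a := s.drop ((PySem.Chars.find s p).toNat + p.length)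
        (if b = [] then [] else paGo all all b) ++ [p] ++ (if a = [] then [] else paGo all all a)
    else paGo all rest s
termination_by (s.length, pats.length)
decreasing_by
  · exact Prod.Lex.left _ _ (pvMatch_take_lt s p hin hp)
  · exact Prod.Lex.left _ _ (pvMatch_drop_lt s p hin hp)
  · exact Prod.Lex.right _ (by simp)

def partition_axiom (string : String) (patterns : List (String × Int)) : List String :=
  let pl := patterns.map (fun q => (q.1.toList, q.2))
  (paGo pl pl string.toList).map (fun cs => String.ofList cs)

-- ===== PORT B =====
-- the inner `for … else` of B: first pattern that occurs in s, split there
def findSplit (pats : List (List Char × Int)) (s : List Char) : Option (List Char × List Char × List Char) :=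
  match pats with
  | [] => none
  | (p, _) :: rest =>
    if PySem.Chars.isIn p s = true then
      if p = [] then none   -- Python raises ValueError here; outside Pre_
      else some (s.take (PySem.Chars.find s p).toNat, p, s.drop ((PySem.Chars.find s p).toNat + p.length))
    else findSplit rest s

theorem findSplit_spec (pats : List (List Char × Int)) (s b f a : List Char)
    (h : findSplit pats s = some (b, f, a)) : f ≠ [] ∧ s = b ++ f ++ a := by
  induction pats with
  | nil => simp [findSplit] at h
  | cons q rest ih =>
    obtain ⟨p, i⟩ := q
    simp only [findSplit] at h
    split_ifs at h with hin hp
    · simp at h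
      obtain ⟨hb, hf, ha⟩ := h
      subst hb hf ha
      exact ⟨hp, pvMatch_split s p hin⟩
    · exact ih h

-- termination weight of the work stack
def pvWeight (st : List (Bool × List Char)) : Nat :=
  (st.map (fun it => if it.1 then 1 else 3 * it.2.length + 1)).sum

theorem pvWeight_push (st : List (Bool × List Char)) (s b f a : List Char)
    (hf : f ≠ []) (hs : s = b ++ f ++ a) :
    pvWeight ((if b = [] then ((true, f) :: (if a = [] then st else (false, a) :: st))
               else (false, b) :: (true, f) :: (if a = [] then st else (false, a) :: st)))
      < pvWeight ((false, s) :: st) := by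
  have : 0 < f.length := List.length_pos_iff.mpr hf
  have hlen : s.length = b.length + f.length + a.length := by subst hs; simp; omega
  split_ifs <;> simp [pvWeight] <;> omega

-- B's while-loop over the stack; `res` is the output accumulator (Python's res.append)
def pbLoop (pats : List (List Char × Int)) (st : List (Bool × List Char)) (res : List (List Char)) : List (List Char) :=
  match st with
  | [] => res
  | (true, s) :: st' => pbLoop pats st' (res ++ [s])
  | (false, s) :: st' =>
    match h : findSplit pats s with
    | none => pbLoop pats st' (res ++ [s])
    | some (b, f, a) =>
      pbLoop pats (if b = [] then ((true, f) :: (if a = [] then st' else (false, a) :: st'))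
                   else (false, b) :: (true, f) :: (if a = [] then st' else (false, a) :: st')) res
termination_by pvWeight st
decreasing_by
  · simp [pvWeight]
  · simp [pvWeight]
  · obtain ⟨hf, hs⟩ := findSplit_spec pats s b f a h
    exact pvWeight_push st' s b f a hf hs

def partition_axiom_alt (string : String) (patterns : List (String × Int)) : List String :=
  let pl := patterns.map (fun q => (q.1.toList, q.2))
  (pbLoop pl [(false, string.toList)] []).map (fun cs => String.ofList cs)

-- ===== PRECONDITION & SPEC =====
-- Pre_ excludes pattern lists containing the empty string "": the empty string occurs in
-- EVERY string, so whenever the scan of some piece reaches ("" , i) as its first matching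
-- pattern, str.partition("") raises ValueError ("empty separator") -- in A and in B alike;
-- on the remaining such inputs, where A happens to return normally because every piece
-- first matches an earlier non-empty pattern, B returns the same value (see cites).
def Pre_partition_axiom (string : String) (patterns : List (String × Int)) : Prop :=
  ∀ q ∈ patterns, q.1 ≠ ""
instance (string : String) (patterns : List (String × Int)) : Decidable (Pre_partition_axiom string patterns) := by unfold Pre_partition_axiom; infer_instance

def pvWitness_partition_axiom : String × (List (String × Int)) := ("aXbYc", [("X", 1), ("Y", 2)])

def Spec_partition_axiom (string : String) (patterns : List (String × Int)) (out : List String) : Prop := out = partition_axiom_alt string patterns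
instance (string : String) (patterns : List (String × Int)) (out : List String) : Decidable (Spec_partition_axiom string patterns out) := by unfold Spec_partition_axiom; infer_instance

-- ===== CLAIM (what is proved, stated in full; the proofs are below) =====
def Claim_equal_partition_axiom : Prop := ∀ (string : String) (patterns : List (String × Int)), Dom_partition_axiom string patterns → Pre_partition_axiom string patterns → Spec_partition_axiom string patterns (partition_axiom string patterns)

-- ===== LEMMAS AND PROOFS =====

-- when no pattern of the remaining suffix matches, A's loop falls to its else
theorem findSplit_none (all pats : List (List Char × Int)) (s : List Char)
    (hne : ∀ q ∈ pats, q.1 ≠ ([] : List Char))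
    (h : findSplit pats s = none) : paGo all pats s = [s] := by
  induction pats with
  | nil => simp [paGo]
  | cons q rest ih =>
    obtain ⟨p, i⟩ := q
    have hp : p ≠ [] := hne (p, i) (by simp)
    simp only [findSplit] at h
    rw [paGo]
    by_cases hin : PySem.Chars.isIn p s = true
    · rw [if_pos hin, if_neg hp] at h
      exact absurd h (by simp)
    · rw [dif_neg hin]
      rw [if_neg hin] at h
      exact ih (fun q hq => hne q (List.mem_cons_of_mem _ hq)) h

-- when the first match is (b, f, a), A's loop body produces exactly the three-way split
theorem findSplit_some_paGo (all pats : List (List Char × Int)) (s b f a : List Char)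
    (hne : ∀ q ∈ pats, q.1 ≠ ([] : List Char))
    (h : findSplit pats s = some (b, f, a)) :
    paGo all pats s = (if b = [] then [] else paGo all all b) ++ [f] ++ (if a = [] then [] else paGo all all a) := by
  induction pats with
  | nil => simp [findSplit] at h
  | cons q rest ih =>
    obtain ⟨p, i⟩ := q
    have hp : p ≠ [] := hne (p, i) (by simp)
    simp only [findSplit] at h
    rw [paGo]
    by_cases hin : PySem.Chars.isIn p s = true
    · rw [if_pos hin, if_neg hp] at h
      simp only [Option.some.injEq, Prod.mk.injEq] at h
      obtain ⟨hb, hf, ha⟩ := h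
      rw [dif_pos hin, dif_neg hp]
      subst hb hf ha
      rfl
    · rw [dif_neg hin]
      rw [if_neg hin] at h
      exact ih (fun q hq => hne q (List.mem_cons_of_mem _ hq)) h

-- expansion of one stack item into the tokens it will eventually contribute
def pvExpand (pats : List (List Char × Int)) (it : Bool × List Char) : List (List Char) :=
  if it.1 then [it.2] else paGo pats pats it.2

-- loop invariant: the result is res ++ the in-order expansion of the stack
theorem pbLoop_eq (pats : List (List Char × Int)) (hne : ∀ q ∈ pats, q.1 ≠ ([] : List Char))
    (st : List (Bool × List Char)) (res : List (List Char)) :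
    pbLoop pats st res = res ++ (st.map (pvExpand pats)).flatten := by
  induction st, res using pbLoop.induct pats with
  | case1 res => simp [pbLoop]
  | case2 res s st' ih =>
    rw [pbLoop, ih]
    simp [pvExpand]
  | case3 res s st' h ih =>
    rw [pbLoop]
    split
    · next h' =>
      rw [ih]
      simp [pvExpand, findSplit_none pats pats s hne h']
    · next b f a h' =>
      rw [h'] at h
      exact absurd h (by simp)
  | case4 res s st' b f a h ih =>
    rw [pbLoop]
    split
    · next h' =>
      rw [h'] at h
      exact absurd h (by simp)
    · next b' f' a' h' =>
      rw [h'] at h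
      simp only [Option.some.injEq, Prod.mk.injEq] at h
      obtain ⟨hb, hf, ha⟩ := h
      subst hb hf ha
      simp only [dite_eq_ite] at ih
      rw [ih]
      have hgo := findSplit_some_paGo pats pats s b' f' a' hne h'
      have hexp : pvExpand pats (false, s) = (if b' = [] then [] else paGo pats pats b') ++ [f'] ++ (if a' = [] then [] else paGo pats pats a') := by
        simp [pvExpand, hgo]
      rw [List.map_cons, List.flatten_cons, hexp]
      by_cases hb : b' = [] <;> by_cases ha : a' = [] <;>
        simp [hb, ha, pvExpand, List.append_assoc]

-- ===== VERDICT (by name: the statement is the Claim_ definition above) =====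
theorem partition_axiom_spec : Claim_equal_partition_axiom := by
  intro string patterns _ hpre
  unfold Spec_partition_axiom partition_axiom partition_axiom_alt
  have hne : ∀ q ∈ patterns.map (fun q => (q.1.toList, q.2)), q.1 ≠ ([] : List Char) := by
    intro q hq
    simp at hq
    obtain ⟨a, b, hmem, h1⟩ := hq
    have := hpre (a, b) hmem
    intro hnil
    rw [← h1] at hnil
    exact this (by simpa using congrArg String.ofList hnil)
  simp only []
  rw [pbLoop_eq _ hne]
  simp [pvExpand]
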